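-- pv_equiv track=rewrite | github.com/DmitryKRTV/codewars | Python/6_kuy/Consonant value/script.py | solve
-- ===== SOURCE A (Python) =====
-- def solve(s):
--     vowels = "aeiou"
--     res = []
--     tmp = 0
--     for c in s:
--         if c not in vowels:
--             tmp += ord(c) - 96
--         else:
--             res.append(tmp)
--             tmp = 0
--     res.append(tmp)
--     return res
-- ===== SOURCE B (Python) =====
-- def solve(s):
--     # Phase 1: split the string into vowel-delimited segments of characters.
--     parts, cur = [], []
--     for c in s:
--         if c in "aeiou":
--             parts.append(cur)
--             cur = []
--         else:
--             cur.append(c)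
--     parts.append(cur)
--     # Phase 2: map each segment to its consonant-value sum.
--     return [sum(ord(c) - 96 for c in p) for p in parts]
-- ===== Notes on version B (the rewrite author's own statement) =====
-- stated objective: alternative
-- what changed: B splits the string into vowel-delimited character segments first and then maps each segment to its sum, instead of A's single pass that maintains a running numeric accumulator appended at each vowel.
import Mathlib
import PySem

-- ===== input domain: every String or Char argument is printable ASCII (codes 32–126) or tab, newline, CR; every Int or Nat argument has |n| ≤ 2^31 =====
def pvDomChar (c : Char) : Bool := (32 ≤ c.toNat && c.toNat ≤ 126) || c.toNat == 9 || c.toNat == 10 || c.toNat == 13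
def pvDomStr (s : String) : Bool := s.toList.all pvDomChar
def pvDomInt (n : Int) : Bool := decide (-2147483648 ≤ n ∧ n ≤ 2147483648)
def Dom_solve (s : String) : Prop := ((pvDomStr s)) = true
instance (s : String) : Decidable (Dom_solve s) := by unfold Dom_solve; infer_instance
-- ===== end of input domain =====

-- B splits into vowel-delimited segments first and then maps each segment to its sum,
-- instead of A's single pass with a running numeric accumulator (objective: alternative).

-- ===== PORT A =====
-- A's loop: state (res, tmp); on a vowel append tmp and reset, else add ord(c)-96.
def solveLoop : List Char → List Int → Int → List Int
  | [], res, tmp => res ++ [tmp]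
  | c :: cs, res, tmp =>
      if c ∉ ['a','e','i','o','u'] then
        solveLoop cs res (tmp + ((c.toNat : Int) - 96))
      else
        solveLoop cs (res ++ [tmp]) 0

def solve (s : String) : List Int := solveLoop s.toList [] 0

-- ===== PORT B =====
-- Phase 1 of Source B: foldl over the characters building (parts, cur) with appends.
def splitStep (st : List (List Char) × List Char) (c : Char) : List (List Char) × List Char :=
  if c ∈ ['a','e','i','o','u'] then (st.1 ++ [st.2], []) else (st.1, st.2 ++ [c])

-- Phase 2 of Source B: the per-segment sum.
def partSum (p : List Char) : Int := (p.map (fun c => (c.toNat : Int) - 96)).sum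

def solve_alt (s : String) : List Int :=
  let st := s.toList.foldl splitStep ([], [])
  (st.1 ++ [st.2]).map partSum

-- ===== PRECONDITION & SPEC =====
def Spec_solve (s : String) (out : List Int) : Prop := out = solve_alt s
instance (s : String) (out : List Int) : Decidable (Spec_solve s out) := by unfold Spec_solve; infer_instance

-- ===== CLAIM (what is proved, stated in full; the proofs are below) =====
def Claim_equal_solve : Prop := ∀ (s : String), Dom_solve s → Spec_solve s (solve s)

-- ===== LEMMAS AND PROOFS =====

theorem partSum_append_one (p : List Char) (c : Char) :
    partSum (p ++ [c]) = partSum p + ((c.toNat : Int) - 96) := by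
  simp [partSum]

theorem solveLoop_foldl (cs : List Char) :
    ∀ (parts : List (List Char)) (cur : List Char),
      solveLoop cs (parts.map partSum) (partSum cur)
        = (let st := cs.foldl splitStep (parts, cur); (st.1 ++ [st.2]).map partSum) := by
  induction cs with
  | nil => intro parts cur; simp [solveLoop]
  | cons c cs ih =>
      intro parts cur
      by_cases hv : c ∈ ['a','e','i','o','u']
      · have h1 : solveLoop (c :: cs) (parts.map partSum) (partSum cur)
            = solveLoop cs ((parts ++ [cur]).map partSum) (partSum []) := by
          simp [solveLoop, hv, partSum]
        rw [h1, ih]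
        simp [List.foldl_cons, splitStep, hv]
      · have h1 : solveLoop (c :: cs) (parts.map partSum) (partSum cur)
            = solveLoop cs (parts.map partSum) (partSum (cur ++ [c])) := by
          simp [solveLoop, hv, partSum_append_one]
        rw [h1, ih]
        simp [List.foldl_cons, splitStep, hv]

-- ===== VERDICT (by name: the statement is the Claim_ definition above) =====
theorem solve_spec : Claim_equal_solve := by
  intro s _
  unfold Spec_solve solve solve_alt
  have h := solveLoop_foldl s.toList [] []
  simpa [partSum] using h
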